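-- pv_equiv track=rewrite | github.com/JonJT/CSC110 | Chapter 8/Quiz/csc110_quiz_08_jonathan_tally.py | maxValueWords
-- ===== SOURCE A (Python) =====
-- from string import ascii_lowercase as lc, ascii_uppercase as uc
--
-- def valueOf(Letter):
--     letter = Letter.lower()
--     if ('a' <= letter <= 'm'):
--         return lc.find(letter)
--     else:
--         return 25 - lc.find(letter)
--
-- Words = 'The quick brown foxes jump over the lazy dog pumj'
--
-- def wordValue(Word):
--     total = 0
--     for ltr in Word:
--         total += valueOf(ltr)
--     return total
--
-- def maxValueWords(Words):
--     listOfWords = Words.split()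
--     values = []
--     wordsWithMaxValue = []
--     for value in listOfWords:
--         values.append(wordValue(value))
--     for maxvalue in listOfWords:
--         if (wordValue(maxvalue) == max(values)):
--             wordsWithMaxValue.append(maxvalue)
--     return wordsWithMaxValue
-- ===== SOURCE B (Python) =====
-- from string import ascii_lowercase as lc, ascii_uppercase as uc
--
-- def valueOf(Letter):
--     letter = Letter.lower()
--     if ('a' <= letter <= 'm'):
--         return lc.find(letter)
--     else:
--         return 25 - lc.find(letter)
--
-- def wordValue(Word):
--     total = 0
--     for ltr in Word:
--         total += valueOf(ltr)
--     return total
--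
-- def maxValueWords(Words):
--     best = None
--     result = []
--     for word in Words.split():
--         v = wordValue(word)
--         if best is None or v > best:
--             best = v
--             result = [word]
--         elif v == best:
--             result.append(word)
--     return result
-- ===== Notes on version B (the rewrite author's own statement) =====
-- stated objective: simpler
-- what changed: Replaced A's two passes (build the full value list, then re-score every word and filter against max(values)) by one pass keeping a running best value and the list of words attaining it; each word's value is computed once.
import Mathlib
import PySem

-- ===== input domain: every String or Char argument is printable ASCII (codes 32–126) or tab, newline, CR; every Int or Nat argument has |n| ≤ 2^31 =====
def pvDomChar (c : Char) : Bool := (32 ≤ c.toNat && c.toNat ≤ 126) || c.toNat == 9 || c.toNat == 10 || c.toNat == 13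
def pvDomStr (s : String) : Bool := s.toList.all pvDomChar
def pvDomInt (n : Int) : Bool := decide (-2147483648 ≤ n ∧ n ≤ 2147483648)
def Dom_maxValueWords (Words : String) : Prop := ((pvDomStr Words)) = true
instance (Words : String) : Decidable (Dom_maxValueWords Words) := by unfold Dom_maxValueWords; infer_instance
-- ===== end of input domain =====

-- B replaces A's two-pass build-values-then-filter-by-max with a single pass keeping a
-- running best value and the words attaining it (objective: simpler).

-- ===== PORT A =====
-- shared same-module helpers (identical in Source A and Source B)
def lcChars : List Char := "abcdefghijklmnopqrstuvwxyz".toList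

def valueOf (Letter : Char) : Int :=
  let letter := PySem.Chars.lowerChar Letter
  if 'a' ≤ letter ∧ letter ≤ 'm' then
    PySem.Chars.find lcChars [letter]
  else
    25 - PySem.Chars.find lcChars [letter]

def wordValue (Word : String) : Int :=
  Word.toList.foldl (fun total ltr => total + valueOf ltr) 0

def maxValueWords (Words : String) : List String :=
  let listOfWords := PySem.Str.split₀ Words
  let values := listOfWords.foldl (fun acc value => acc ++ [wordValue value]) []
  let wordsWithMaxValue := listOfWords.foldl
    (fun acc maxvalue =>
      if some (wordValue maxvalue) = PySem.List.max? values (fun y => y) then acc ++ [maxvalue]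
      else acc) []
  wordsWithMaxValue

-- ===== PORT B =====
def bLoop : List String → Option Int → List String → List String
  | [], _, result => result
  | word :: ws, best, result =>
    let v := wordValue word
    match best with
    | none => bLoop ws (some v) [word]
    | some b =>
      if v > b then bLoop ws (some v) [word]
      else if v = b then bLoop ws (some b) (result ++ [word])
      else bLoop ws (some b) result

def maxValueWords_alt (Words : String) : List String :=
  bLoop (PySem.Str.split₀ Words) none []

-- ===== PRECONDITION & SPEC =====
def Spec_maxValueWords (Words : String) (out : List String) : Prop := out = maxValueWords_alt Words
instance (Words : String) (out : List String) : Decidable (Spec_maxValueWords Words out) := by unfold Spec_maxValueWords; infer_instance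

-- ===== CLAIM (what is proved, stated in full; the proofs are below) =====
def Claim_equal_maxValueWords : Prop := ∀ (Words : String), Dom_maxValueWords Words → Spec_maxValueWords Words (maxValueWords Words)

-- ===== LEMMAS AND PROOFS =====

-- B's loop with a running best b computes: the words of ws whose value equals the overall
-- max m = foldl max b (values of ws), prefixed by the accumulated result iff m stays b.
theorem bLoop_some (ws : List String) (b : Int) (res : List String) :
    bLoop ws (some b) res =
      (if (ws.map wordValue).foldl max b = b then res else [])
        ++ ws.filter (fun w => wordValue w = (ws.map wordValue).foldl max b) := by
  induction ws generalizing b res with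
  | nil => simp [bLoop]
  | cons w t ih =>
    have hle : max b (wordValue w) ≤ (t.map wordValue).foldl max (max b (wordValue w)) :=
      (PySem.List.le_foldl_max _ _).1
    simp only [bLoop, List.map_cons, List.foldl_cons, List.filter_cons]
    by_cases hgt : wordValue w > b
    · rw [if_pos hgt, ih]
      have hmb : max b (wordValue w) = wordValue w := by omega
      simp only [hmb] at hle ⊢
      have hne : ¬ (t.map wordValue).foldl max (wordValue w) = b := by omega
      rw [if_neg hne]
      by_cases hwm : wordValue w = (t.map wordValue).foldl max (wordValue w)
      · simp [← hwm]
      · have hwm' : ¬ (t.map wordValue).foldl max (wordValue w) = wordValue w :=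
          fun h => hwm h.symm
        simp [hwm, hwm']
    · rw [if_neg hgt]
      have hmb : max b (wordValue w) = b := by omega
      simp only [hmb] at hle ⊢
      by_cases heq : wordValue w = b
      · rw [if_pos heq, ih]
        by_cases hfb : (t.map wordValue).foldl max b = b
        · simp [hfb, heq]
        · have : ¬ wordValue w = (t.map wordValue).foldl max b := by
            intro h; omega
          simp [hfb, this]
      · rw [if_neg heq, ih]
        have : ¬ wordValue w = (t.map wordValue).foldl max b := by
          intro h; omega
        simp [this]

-- A's first loop builds the value list; its second loop is a filter against the max.
theorem maxValueWords_eq_filter (ws : List String) :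
    (ws.foldl (fun acc v =>
        if some (wordValue v) = PySem.List.max? (ws.foldl (fun acc value => acc ++ [wordValue value]) []) (fun y => y)
        then acc ++ [v] else acc) []) =
      ws.filter (fun w =>
        decide (some (wordValue w) = PySem.List.max? (ws.map wordValue) (fun y => y))) := by
  rw [PySem.List.foldl_append_singleton_eq_map]
  have := PySem.List.foldl_append_if
      (fun v => decide (some (wordValue v) = PySem.List.max? (ws.map wordValue) (fun y => y)))
      (fun v : String => v) ws []
  simpa using this


-- ===== VERDICT (by name: the statement is the Claim_ definition above) =====
theorem maxValueWords_spec : Claim_equal_maxValueWords := by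
  intro Words _
  unfold Spec_maxValueWords maxValueWords maxValueWords_alt
  simp only []
  rw [maxValueWords_eq_filter]
  cases h : PySem.Str.split₀ Words with
  | nil => simp [bLoop]
  | cons w t =>
    simp only [List.map_cons, PySem.List.max?_id_cons, bLoop, List.filter_cons]
    rw [bLoop_some]
    by_cases hwm : wordValue w = (t.map wordValue).foldl max (wordValue w)
    · rw [if_pos (by simp [← hwm]), if_pos hwm.symm]
      simp
    · rw [if_neg (by simp [hwm]), if_neg (fun h => hwm h.symm)]
      simp
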